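-- pv_equiv track=rewrite | github.com/Larissa-11/INNSE | codes/encode_rule.py | find_delete_combinations
-- ===== SOURCE A (Python) =====
-- import copy
--
-- def delete_one_element(lst):
--     all_combinations = []
--     for i in range(len(lst)):
--         new_lst = list(lst)
--         del new_lst[i]
--         all_combinations.append(tuple(new_lst))
--     return all_combinations
--
-- def delete_check(seq1, seq2):
--     combinations_seq1 = delete_one_element(seq1)
--     combinations_seq2 = delete_one_element(seq2)
--     for tuple1 in combinations_seq1:
--         for tuple2 in combinations_seq2:
--             if tuple1 == tuple2:
--                 return True
--     return False
--
-- def find_delete_combinations(de_sequence, de_sequence_array):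
--     de_result = [de_sequence]
--     deletecombinations = copy.copy(de_result)
--     for seq in de_sequence_array:
--         de_result = copy.copy(deletecombinations)
--         i = 0
--         for comb in de_result:
--             Tf = delete_check(seq, comb)
--             if Tf == False:
--                 i = i + 1
--             if i == len(de_result):
--                 deletecombinations.append(seq)
--     return deletecombinations
-- ===== SOURCE B (Python) =====
-- def _strip_common_prefix(s, t):
--     i = 0
--     while i < len(s) and s[i] == t[i]:
--         i += 1
--     return s[i:], t[i:]
--
--
-- def _delete_adjacent(s, t):
--     """True iff deleting one element from s and one from t can give equal tuples."""
--     if len(s) != len(t) or not s: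
--         return False
--     s, t = _strip_common_prefix(s, t)
--     if not s:
--         return True
--     rs, rt = _strip_common_prefix(s[::-1], t[::-1])
--     return rs[1:] == rt[:-1] or rt[1:] == rs[:-1]
--
--
-- def find_delete_combinations(de_sequence, de_sequence_array):
--     deletecombinations = [de_sequence]
--     for seq in de_sequence_array:
--         if not any(_delete_adjacent(seq, comb) for comb in deletecombinations):
--             deletecombinations.append(seq)
--     return deletecombinations
-- ===== Notes on version B (the rewrite author's own statement) =====
-- stated objective: faster
-- what changed: A's per-pair test materializes all one-deletion variants of both sequences and compares them pairwise (O(L^3) per pair); B strips the common prefix and the common suffix and compares the two remaining middles shifted by one position each way (O(L) per pair), and the outer counter-and-snapshot loop becomes a plain 'append unless any existing entry is deletion-adjacent' fold.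
import Mathlib
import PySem

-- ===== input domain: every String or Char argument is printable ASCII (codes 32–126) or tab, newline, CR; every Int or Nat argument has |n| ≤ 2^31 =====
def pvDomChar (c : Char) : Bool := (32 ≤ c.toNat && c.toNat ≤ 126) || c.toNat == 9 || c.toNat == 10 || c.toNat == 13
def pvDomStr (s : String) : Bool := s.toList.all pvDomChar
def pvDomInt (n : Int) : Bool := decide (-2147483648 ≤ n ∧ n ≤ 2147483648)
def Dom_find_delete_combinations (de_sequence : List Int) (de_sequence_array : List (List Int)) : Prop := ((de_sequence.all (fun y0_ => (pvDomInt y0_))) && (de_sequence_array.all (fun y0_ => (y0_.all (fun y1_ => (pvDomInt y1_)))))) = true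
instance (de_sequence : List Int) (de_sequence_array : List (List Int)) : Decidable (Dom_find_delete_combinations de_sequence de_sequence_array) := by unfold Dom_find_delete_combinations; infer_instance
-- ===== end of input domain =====

-- B replaces A's per-pair test "generate all one-deletion variants of both sequences and
-- compare them pairwise" by a single strip-common-prefix/suffix pass that compares the two
-- shifted middles once; proved to return exactly A's value on every input.

-- ===== PORT A =====
-- for i in range(len(lst)): new_lst = list(lst); del new_lst[i]; all_combinations.append(...)
def delete_one_element (lst : List Int) : List (List Int) :=
  (List.range lst.length).foldl (fun acc i => acc ++ [lst.eraseIdx i]) []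

-- the two nested loops with early return = nested any
def delete_check (seq1 seq2 : List Int) : Bool :=
  (delete_one_element seq1).any (fun tuple1 =>
    (delete_one_element seq2).any (fun tuple2 => tuple1 == tuple2))

-- outer loop: de_result is the snapshot iterated over, (i, deletecombinations) the loop state
def find_delete_combinations (de_sequence : List Int) (de_sequence_array : List (List Int)) : List (List Int) :=
  de_sequence_array.foldl (fun deletecombinations seq =>
    let de_result := deletecombinations
    (de_result.foldl (fun (st : Nat × List (List Int)) comb =>
      let i := if delete_check seq comb = false then st.1 + 1 else st.1
      let dcs := if i = de_result.length then st.2 ++ [seq] else st.2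
      (i, dcs)) (0, deletecombinations)).2) [de_sequence]

-- ===== PORT B =====
-- _strip_common_prefix: while i < len(s) and s[i] == t[i]: i += 1; return s[i:], t[i:]
def stripCommonPrefix : List Int → List Int → List Int × List Int
  | a :: as, b :: bs => if a = b then stripCommonPrefix as bs else (a :: as, b :: bs)
  | as, bs => (as, bs)

-- _delete_adjacent: strip the common prefix, then (on the reversed remainders) the common
-- suffix, and compare the two middles shifted by one position each way
def delete_adjacent (s t : List Int) : Bool :=
  if s.length ≠ t.length ∨ s = [] then false
  else
    let p := stripCommonPrefix s t
    if p.1 = [] then true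
    else
      let q := stripCommonPrefix p.1.reverse p.2.reverse
      (q.1.tail == q.2.dropLast) || (q.2.tail == q.1.dropLast)

def find_delete_combinations_alt (de_sequence : List Int) (de_sequence_array : List (List Int)) : List (List Int) :=
  de_sequence_array.foldl (fun acc seq =>
    if acc.any (fun comb => delete_adjacent seq comb) then acc else acc ++ [seq]) [de_sequence]

-- ===== PRECONDITION & SPEC =====
def Spec_find_delete_combinations (de_sequence : List Int) (de_sequence_array : List (List Int)) (out : List (List Int)) : Prop := out = find_delete_combinations_alt de_sequence de_sequence_array
instance (de_sequence : List Int) (de_sequence_array : List (List Int)) (out : List (List Int)) : Decidable (Spec_find_delete_combinations de_sequence de_sequence_array out) := by unfold Spec_find_delete_combinations; infer_instance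

-- ===== CLAIM (what is proved, stated in full; the proofs are below) =====
def Claim_equal_find_delete_combinations : Prop := ∀ (de_sequence : List Int) (de_sequence_array : List (List Int)), Dom_find_delete_combinations de_sequence de_sequence_array → Spec_find_delete_combinations de_sequence de_sequence_array (find_delete_combinations de_sequence de_sequence_array)

-- ===== LEMMAS AND PROOFS =====

-- the common Prop both per-pair tests decide: some one-deletion of s equals one of t
def DelAdj (s t : List Int) : Prop :=
  ∃ i < s.length, ∃ j < t.length, s.eraseIdx i = t.eraseIdx j

theorem strip_spec (s t : List Int) :
    ∃ p : List Int, s = p ++ (stripCommonPrefix s t).1 ∧ t = p ++ (stripCommonPrefix s t).2 ∧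
      (∀ a as b bs, (stripCommonPrefix s t).1 = a :: as → (stripCommonPrefix s t).2 = b :: bs → a ≠ b) := by
  induction s generalizing t with
  | nil =>
    refine ⟨[], by simp [stripCommonPrefix], by simp [stripCommonPrefix], ?_⟩
    intro a as b bs h1 h2
    simp [stripCommonPrefix] at h1
  | cons a as ih =>
    cases t with
    | nil =>
      refine ⟨[], by simp [stripCommonPrefix], by simp [stripCommonPrefix], ?_⟩
      intro x xs y ys h1 h2
      simp [stripCommonPrefix] at h2
    | cons b bs =>
      by_cases hab : a = b
      · obtain ⟨p, h1, h2, h3⟩ := ih bs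
        subst hab
        refine ⟨a :: p, ?_, ?_, ?_⟩
        · simpa [stripCommonPrefix] using h1
        · simpa [stripCommonPrefix] using h2
        · simpa [stripCommonPrefix] using h3
      · refine ⟨[], by simp [stripCommonPrefix, hab], by simp [stripCommonPrefix, hab], ?_⟩
        intro x xs y ys h1 h2
        simp [stripCommonPrefix, hab] at h1 h2
        rw [← h1.1, ← h2.1]
        exact hab

theorem eraseIdx_append_add (l m : List Int) (k : Nat) :
    (l ++ m).eraseIdx (l.length + k) = l ++ m.eraseIdx k := by
  induction l with
  | nil => simp
  | cons a as ih => simpa [List.eraseIdx, Nat.succ_add] using ih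

theorem delAdj_of_mid (p ms mt qq : List Int) (hm : ms.length = mt.length) (hms : ms ≠ [])
    (h : ms.tail = mt.dropLast) :
    DelAdj (p ++ ms ++ qq) (p ++ mt ++ qq) := by
  have hmt : mt ≠ [] := by
    intro h'; subst h'; exact hms (by simpa using hm)
  have hpos : 0 < ms.length := List.length_pos_iff.mpr hms
  refine ⟨p.length, by simp; omega, p.length + (mt.length - 1), by simp; omega, ?_⟩
  have h1 : (p ++ ms ++ qq).eraseIdx p.length = p ++ (ms.tail ++ qq) := by
    have e := eraseIdx_append_add p (ms ++ qq) 0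
    simp only [Nat.add_zero, List.eraseIdx_zero] at e
    rw [List.append_assoc, e, List.tail_append_of_ne_nil hms]
  have h2 : (p ++ mt ++ qq).eraseIdx (p.length + (mt.length - 1)) = p ++ (mt.dropLast ++ qq) := by
    rw [List.append_assoc, eraseIdx_append_add]
    congr 1
    conv_lhs => rw [← List.dropLast_concat_getLast hmt, List.append_assoc]
    rw [show (mt.dropLast ++ [mt.getLast hmt]).length - 1 = mt.dropLast.length + 0 by simp]
    rw [eraseIdx_append_add]
    simp
  rw [h1, h2, h]

theorem getElem_mid (p ms qq : List Int) (k r : Nat) (hr : r < ms.length)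
    (hk : k = p.length + r) :
    (p ++ ms ++ qq)[k]'(by simp; omega) = ms[r] := by
  subst hk
  rw [List.getElem_of_eq (List.append_assoc p ms qq)]
  rw [List.getElem_append_right (by omega)]
  simp only [Nat.add_sub_cancel_left]
  exact List.getElem_append_left hr

theorem getD_mid (p ms qq : List Int) (r : Nat) (hr : r < ms.length) :
    (p ++ ms ++ qq).getD (p.length + r) 0 = ms.getD r 0 := by
  rw [List.getD_eq_getElem _ _ (by simp; omega), List.getD_eq_getElem _ _ hr]
  exact getElem_mid p ms qq (p.length + r) r hr rfl

theorem mid_of_delAdj (p ms mt qq : List Int) (i j : Nat)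
    (hm : ms.length = mt.length) (hms : ms ≠ []) (hmt : mt ≠ [])
    (hhead : ms.head hms ≠ mt.head hmt) (hlast : ms.getLast hms ≠ mt.getLast hmt)
    (hij : i ≤ j) (hi : i < (p ++ ms ++ qq).length) (hj : j < (p ++ mt ++ qq).length)
    (heq : (p ++ ms ++ qq).eraseIdx i = (p ++ mt ++ qq).eraseIdx j) :
    ms.tail = mt.dropLast := by
  have hpos : 0 < ms.length := List.length_pos_iff.mpr hms
  have hlenS : (p ++ ms ++ qq).length = p.length + ms.length + qq.length := by simp; omega
  have hlenT : (p ++ mt ++ qq).length = p.length + ms.length + qq.length := by simp; omega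
  rw [hlenS] at hi
  rw [hlenT] at hj
  have hEl : ∀ k, k < p.length + ms.length + qq.length - 1 →
      (if k < i then (p ++ ms ++ qq).getD k 0 else (p ++ ms ++ qq).getD (k+1) 0) =
      (if k < j then (p ++ mt ++ qq).getD k 0 else (p ++ mt ++ qq).getD (k+1) 0) := by
    intro k hk
    have h1 : ((p ++ ms ++ qq).eraseIdx i).getD k 0 = ((p ++ mt ++ qq).eraseIdx j).getD k 0 := by
      rw [heq]
    rw [List.getD_eq_getElem _ _ (by rw [List.length_eraseIdx, hlenS, if_pos hi]; omega),
        List.getD_eq_getElem _ _ (by rw [List.length_eraseIdx, hlenT, if_pos hj]; omega),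
        List.getElem_eraseIdx, List.getElem_eraseIdx] at h1
    by_cases hki : k < i <;> by_cases hkj : k < j <;>
      simp only [hki, hkj, dif_pos, dif_neg, not_false_iff, if_pos, if_neg] at h1 ⊢ <;>
      rw [List.getD_eq_getElem _ _ (by rw [hlenS]; omega),
          List.getD_eq_getElem _ _ (by rw [hlenT]; omega)] <;> exact h1
  have hSf : (p ++ ms ++ qq).getD p.length 0 = ms.head hms := by
    have := getD_mid p ms qq 0 hpos
    rw [Nat.add_zero] at this
    rw [this, List.getD_eq_getElem _ _ hpos, List.head_eq_getElem]
  have hTf : (p ++ mt ++ qq).getD p.length 0 = mt.head hmt := by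
    have := getD_mid p mt qq 0 (by omega)
    rw [Nat.add_zero] at this
    rw [this, List.getD_eq_getElem _ _ (by omega), List.head_eq_getElem]
  have hSl : (p ++ ms ++ qq).getD (p.length + (ms.length - 1)) 0 = ms.getLast hms := by
    rw [getD_mid p ms qq _ (by omega), List.getD_eq_getElem _ _ (by omega),
      List.getLast_eq_getElem]
  have hTl : (p ++ mt ++ qq).getD (p.length + (ms.length - 1)) 0 = mt.getLast hmt := by
    rw [getD_mid p mt qq _ (by omega), List.getD_eq_getElem _ _ (by omega),
      List.getLast_eq_getElem]
    congr 1
    omega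
  have hif : i ≤ p.length := by
    by_contra hc
    have h := hEl p.length (by omega)
    rw [if_pos (by omega), if_pos (by omega)] at h
    rw [hSf, hTf] at h
    exact hhead h
  have hjl : p.length + (ms.length - 1) ≤ j := by
    by_contra hc
    obtain ⟨k', hk'⟩ : ∃ k', p.length + (ms.length - 1) = k' + 1 ∨
        (p.length + (ms.length - 1) = 0 ∧ k' = 0) := ⟨p.length + (ms.length - 1) - 1, by omega⟩
    rcases hk' with hk' | ⟨hk', _⟩
    · have h := hEl k' (by omega)
      rw [if_neg (by omega), if_neg (by omega), ← hk'] at h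
      rw [hSl, hTl] at h
      exact hlast h
    · omega
  have hshift : ∀ k, i ≤ k → k < j →
      (p ++ ms ++ qq).getD (k+1) 0 = (p ++ mt ++ qq).getD k 0 := by
    intro k h1 h2
    have h := hEl k (by omega)
    rw [if_neg (by omega), if_pos h2] at h
    exact h
  apply List.ext_getElem (by simp [hm])
  intro r hr1 hr2
  have hr1' : r + 1 < ms.length := by simp at hr1; omega
  have hr2' : r < mt.length := by simp at hr2; omega
  rw [List.getElem_tail, List.getElem_dropLast,
    ← List.getD_eq_getElem ms 0 hr1', ← List.getD_eq_getElem mt 0 hr2',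
    ← getD_mid p ms qq (r+1) hr1', ← getD_mid p mt qq r hr2',
    ← Nat.add_assoc]
  exact hshift (p.length + r) (by omega) (by omega)

theorem delete_one_element_eq_map (lst : List Int) :
    delete_one_element lst = (List.range lst.length).map lst.eraseIdx := by
  simpa [delete_one_element] using
    PySem.List.foldl_append_singleton_eq_map lst.eraseIdx (List.range lst.length) []

theorem delete_check_iff (s t : List Int) : delete_check s t = true ↔ DelAdj s t := by
  simp only [delete_check, delete_one_element_eq_map, List.any_eq_true, List.mem_map,
    List.mem_range, beq_iff_eq, DelAdj]
  constructor
  · rintro ⟨x, ⟨i, hi, rfl⟩, y, ⟨j, hj, rfl⟩, h⟩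
    exact ⟨i, hi, j, hj, h⟩
  · rintro ⟨i, hi, j, hj, h⟩
    exact ⟨_, ⟨i, hi, rfl⟩, _, ⟨j, hj, rfl⟩, h⟩

theorem delAdj_comm (s t : List Int) (h : DelAdj s t) : DelAdj t s := by
  obtain ⟨i, hi, j, hj, h⟩ := h
  exact ⟨j, hj, i, hi, h.symm⟩

theorem delete_adjacent_iff (s t : List Int) : delete_adjacent s t = true ↔ DelAdj s t := by
  unfold delete_adjacent
  by_cases hg : s.length ≠ t.length ∨ s = []
  · rw [if_pos hg]
    simp only [Bool.false_eq_true, false_iff]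
    rintro ⟨i, hi, j, hj, h⟩
    rcases hg with hg | hg
    · apply hg
      have := congrArg List.length h
      rw [List.length_eraseIdx, List.length_eraseIdx, if_pos hi, if_pos hj] at this
      omega
    · subst hg; simp at hi
  · rw [if_neg hg]
    have hlen : s.length = t.length := by by_contra h; exact hg (Or.inl h)
    have hsne : s ≠ [] := fun h => hg (Or.inr h)
    obtain ⟨p, hs, ht, hne⟩ := strip_spec s t
    have hmid_len : (stripCommonPrefix s t).1.length = (stripCommonPrefix s t).2.length := by
      have e1 := congrArg List.length hs
      have e2 := congrArg List.length ht
      simp at e1 e2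
      omega
    by_cases h1 : (stripCommonPrefix s t).1 = []
    · rw [if_pos h1]
      have h2 : (stripCommonPrefix s t).2 = [] := by
        rw [h1] at hmid_len
        exact List.length_eq_zero_iff.mp (by simpa using hmid_len.symm)
      have hst : s = t := by
        rw [h1] at hs
        rw [h2] at ht
        simp at hs ht
        rw [hs, ht]
      simp only [true_iff]
      refine ⟨0, ?_, 0, ?_, by rw [hst]⟩
      · exact List.length_pos_iff.mpr hsne
      · rw [← hst]; exact List.length_pos_iff.mpr hsne
    · rw [if_neg h1]
      set s1 := (stripCommonPrefix s t).1 with hs1d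
      set t1 := (stripCommonPrefix s t).2 with ht1d
      have ht1ne : t1 ≠ [] := by
        intro h'
        rw [h'] at hmid_len
        exact h1 (List.length_eq_zero_iff.mp (by simpa using hmid_len))
      -- second strip, on the reversed remainders
      obtain ⟨q', hrs, hrt, hne2⟩ := strip_spec s1.reverse t1.reverse
      set rs := (stripCommonPrefix s1.reverse t1.reverse).1 with hrsd
      set rt := (stripCommonPrefix s1.reverse t1.reverse).2 with hrtd
      have hrs_len : rs.length = rt.length := by
        have e1 := congrArg List.length hrs
        have e2 := congrArg List.length hrt
        simp at e1 e2
        omega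
      have hrsne : rs ≠ [] := by
        intro h'
        have hrt' : rt = [] := by
          rw [h'] at hrs_len
          exact List.length_eq_zero_iff.mp (by simpa using hrs_len.symm)
        rw [h'] at hrs
        rw [hrt'] at hrt
        simp only [List.append_nil] at hrs hrt
        have hst1 : s1 = t1 := List.reverse_injective (hrs.trans hrt.symm)
        obtain ⟨a, as, ha⟩ := List.exists_cons_of_ne_nil h1
        obtain ⟨b, bs, hb⟩ := List.exists_cons_of_ne_nil ht1ne
        have hcons : a :: as = b :: bs := by rw [← ha, ← hb]; exact hst1
        simp only [List.cons.injEq] at hcons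
        exact hne a as b bs ha hb hcons.1
      have hrtne : rt ≠ [] := by
        intro h'
        rw [h'] at hrs_len
        exact hrsne (List.length_eq_zero_iff.mp (by simpa using hrs_len))
      -- middles in original orientation
      have hs1 : s1 = rs.reverse ++ q'.reverse := by
        have := congrArg List.reverse hrs
        simpa using this
      have ht1 : t1 = rt.reverse ++ q'.reverse := by
        have := congrArg List.reverse hrt
        simpa using this
      have hS : s = p ++ rs.reverse ++ q'.reverse := by rw [hs, hs1, List.append_assoc]
      have hT : t = p ++ rt.reverse ++ q'.reverse := by rw [ht, ht1, List.append_assoc]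
      have hmsne : rs.reverse ≠ [] := by simpa using hrsne
      have hmtne : rt.reverse ≠ [] := by simpa using hrtne
      have hmlen : rs.reverse.length = rt.reverse.length := by simpa using hrs_len
      -- heads of the middles differ (they are the heads of s1, t1)
      obtain ⟨a, as, ha⟩ := List.exists_cons_of_ne_nil h1
      obtain ⟨b, bs, hb⟩ := List.exists_cons_of_ne_nil ht1ne
      obtain ⟨x, xs, hx⟩ := List.exists_cons_of_ne_nil hmsne
      obtain ⟨y, ys, hy⟩ := List.exists_cons_of_ne_nil hmtne
      have hax : a = x := by
        have e : s1 = x :: (xs ++ q'.reverse) := by rw [hs1, hx]; rfl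
        rw [ha] at e
        simp only [List.cons.injEq] at e
        exact e.1
      have hby : b = y := by
        have e : t1 = y :: (ys ++ q'.reverse) := by rw [ht1, hy]; rfl
        rw [hb] at e
        simp only [List.cons.injEq] at e
        exact e.1
      have hhead : rs.reverse.head hmsne ≠ rt.reverse.head hmtne := by
        simp only [hx, hy, List.head_cons]
        rw [← hax, ← hby]
        exact hne a as b bs ha hb
      -- last elements of the middles differ (they are the heads of rs, rt)
      have hlast : rs.reverse.getLast hmsne ≠ rt.reverse.getLast hmtne := by
        obtain ⟨c, cs, hc⟩ := List.exists_cons_of_ne_nil hrsne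
        obtain ⟨d, ds, hd⟩ := List.exists_cons_of_ne_nil hrtne
        rw [List.getLast_reverse, List.getLast_reverse]
        simp only [hc, hd, List.head_cons]
        exact hne2 c cs d ds hc hd
      have d1 : rs.tail = rt.dropLast ↔ rs.reverse.dropLast = rt.reverse.tail := by
        rw [List.dropLast_reverse, List.tail_reverse]
        exact ⟨fun h => by rw [h], fun h => List.reverse_injective h⟩
      have d2 : rt.tail = rs.dropLast ↔ rt.reverse.dropLast = rs.reverse.tail := by
        rw [List.dropLast_reverse, List.tail_reverse]
        exact ⟨fun h => by rw [h], fun h => List.reverse_injective h⟩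
      have hDel : DelAdj s t ↔ (rs.tail = rt.dropLast ∨ rt.tail = rs.dropLast) := by
        rw [d1, d2]
        constructor
        · rintro ⟨i, hi, j, hj, heq⟩
          rw [hS] at hi
          rw [hT] at hj
          rw [hS, hT] at heq
          rcases Nat.le_total i j with hij | hij
          · right
            exact (mid_of_delAdj p rs.reverse rt.reverse q'.reverse i j hmlen hmsne hmtne
              hhead hlast hij hi hj heq).symm
          · left
            exact (mid_of_delAdj p rt.reverse rs.reverse q'.reverse j i hmlen.symm hmtne hmsne
              (Ne.symm hhead) (Ne.symm hlast) hij hj hi heq.symm).symm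
        · rintro (h | h)
          · have hd := delAdj_of_mid p rt.reverse rs.reverse q'.reverse hmlen.symm hmtne h.symm
            rw [hS, hT]
            exact delAdj_comm _ _ hd
          · have hd := delAdj_of_mid p rs.reverse rt.reverse q'.reverse hmlen hmsne h.symm
            rw [hS, hT]
            exact hd
      rw [hDel]
      simp only [Bool.or_eq_true, beq_iff_eq]
      exact Iff.rfl

theorem check_eq (s t : List Int) : delete_check s t = delete_adjacent s t := by
  rw [Bool.eq_iff_iff, delete_check_iff, delete_adjacent_iff]

theorem inner_loop (seq : List Int) (L : Nat) :
    ∀ (l : List (List Int)) (c : Nat) (dcs : List (List Int)), c + l.length ≤ L → c < L →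
    (l.foldl (fun (st : Nat × List (List Int)) comb =>
      let i := if delete_check seq comb = false then st.1 + 1 else st.1
      let dcs := if i = L then st.2 ++ [seq] else st.2
      (i, dcs)) (c, dcs)).2
    = if c + l.length = L ∧ l.all (fun comb => !delete_check seq comb) then dcs ++ [seq] else dcs := by
  intro l
  induction l with
  | nil =>
    intro c dcs hle hlt
    simp only [List.foldl_nil, List.all_nil, List.length_nil, Nat.add_zero, and_true]
    rw [if_neg (by omega)]
  | cons comb rest ih =>
    intro c dcs hle hlt
    simp only [List.length_cons] at hle
    rw [List.foldl_cons]
    show (List.foldl _ ((if delete_check seq comb = false then c + 1 else c),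
      (if (if delete_check seq comb = false then c + 1 else c) = L
        then dcs ++ [seq] else dcs)) rest).2 = _
    simp only [List.length_cons, List.all_cons]
    by_cases hch : delete_check seq comb = false
    · rw [if_pos hch]
      by_cases hcL : c + 1 = L
      · have hrest : rest = [] := by
          exact List.length_eq_zero_iff.mp (by omega)
        subst hrest
        rw [if_pos hcL]
        simp only [List.foldl_nil, List.length_nil, List.all_nil, Bool.and_true]
        rw [if_pos ⟨by omega, by simp [hch]⟩]
      · rw [if_neg hcL]
        rw [ih (c + 1) dcs (by omega) (by omega)]
        simp only [hch, Bool.not_false, Bool.true_and]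
        have e : c + 1 + rest.length = c + (rest.length + 1) := by omega
        rw [e]
    · rw [if_neg hch]
      have hch' : delete_check seq comb = true := by
        cases h : delete_check seq comb
        · exact absurd h hch
        · rfl
      rw [if_neg (by omega)]
      rw [ih c dcs (by omega) hlt]
      simp only [hch', Bool.not_true, Bool.false_and]
      rw [if_neg (by omega), if_neg (by simp)]

theorem outer_loop (arr : List (List Int)) :
    ∀ acc : List (List Int), acc ≠ [] →
    arr.foldl (fun deletecombinations seq =>
      let de_result := deletecombinations
      (de_result.foldl (fun (st : Nat × List (List Int)) comb =>
        let i := if delete_check seq comb = false then st.1 + 1 else st.1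
        let dcs := if i = de_result.length then st.2 ++ [seq] else st.2
        (i, dcs)) (0, deletecombinations)).2) acc
    = arr.foldl (fun acc seq =>
        if acc.any (fun comb => delete_adjacent seq comb) then acc else acc ++ [seq]) acc := by
  induction arr with
  | nil => intro acc _; rfl
  | cons seq rest ih =>
    intro acc hne
    rw [List.foldl_cons, List.foldl_cons]
    have hstep : (acc.foldl (fun (st : Nat × List (List Int)) comb =>
        let i := if delete_check seq comb = false then st.1 + 1 else st.1
        let dcs := if i = acc.length then st.2 ++ [seq] else st.2
        (i, dcs)) (0, acc)).2
        = if acc.any (fun comb => delete_adjacent seq comb) then acc else acc ++ [seq] := by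
      rw [inner_loop seq acc.length acc 0 acc (by omega) (List.length_pos_iff.mpr hne)]
      have hany : acc.any (fun comb => delete_adjacent seq comb)
          = !acc.all (fun comb => !delete_check seq comb) := by
        rw [List.any_eq_not_all_not]
        congr 2
        funext comb
        rw [check_eq]
      rw [hany]
      cases hall : acc.all (fun comb => !delete_check seq comb)
      · simp
      · simp
    rw [hstep]
    by_cases hany : acc.any (fun comb => delete_adjacent seq comb) = true
    · rw [if_pos hany] at *
      exact ih acc hne
    · rw [if_neg hany] at *
      exact ih (acc ++ [seq]) (by simp)

-- ===== VERDICT (by name: the statement is the Claim_ definition above) =====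
theorem find_delete_combinations_spec : Claim_equal_find_delete_combinations := by
  intro de_sequence de_sequence_array _
  unfold Spec_find_delete_combinations find_delete_combinations find_delete_combinations_alt
  exact outer_loop de_sequence_array [de_sequence] (by simp)
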